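-- pv_equiv track=rewrite | github.com/rlguy/Blender-FLIP-Fluids | src/addon/presets/preset_library.py | __sort_package_info_list
-- ===== SOURCE A (Python) =====
-- def __sort_package_info_list(info_list):
--     sys_list = []
--     usr_list = []
--     usr_default_list = []
--     for info in info_list:
--         if info['is_system_package']:
--             sys_list.append(info)
--         else:
--             if info['is_default_user_package']:
--                 usr_default_list.append(info)
--             else:
--                 usr_list.append(info)
--
--     sys_list = sorted(sys_list, key=lambda k: str.lower(k['name']), reverse=True)
--     usr_default_list = sorted(usr_default_list, key=lambda k: str.lower(k['name']), reverse=True)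
--     usr_list = sorted(usr_list, key=lambda k: str.lower(k['name']), reverse=True)
--     return usr_list + usr_default_list + sys_list
-- ===== SOURCE B (Python) =====
-- def __sort_package_info_list(info_list):
--     def rank(info):
--         if info['is_system_package']:
--             return 2
--         if info['is_default_user_package']:
--             return 1
--         return 0
--     by_name = sorted(info_list, key=lambda k: str.lower(k['name']), reverse=True)
--     return sorted(by_name, key=rank)
-- ===== Notes on version B (the rewrite author's own statement) =====
-- stated objective: simpler
-- what changed: Replaces the three-way partition into separate lists followed by three sorts and a concatenation with two stable sorts over the whole list: first by lowercased name descending, then by a category rank (user=0, default-user=1, system=2) ascending; stability makes the results identical.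
import Mathlib
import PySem

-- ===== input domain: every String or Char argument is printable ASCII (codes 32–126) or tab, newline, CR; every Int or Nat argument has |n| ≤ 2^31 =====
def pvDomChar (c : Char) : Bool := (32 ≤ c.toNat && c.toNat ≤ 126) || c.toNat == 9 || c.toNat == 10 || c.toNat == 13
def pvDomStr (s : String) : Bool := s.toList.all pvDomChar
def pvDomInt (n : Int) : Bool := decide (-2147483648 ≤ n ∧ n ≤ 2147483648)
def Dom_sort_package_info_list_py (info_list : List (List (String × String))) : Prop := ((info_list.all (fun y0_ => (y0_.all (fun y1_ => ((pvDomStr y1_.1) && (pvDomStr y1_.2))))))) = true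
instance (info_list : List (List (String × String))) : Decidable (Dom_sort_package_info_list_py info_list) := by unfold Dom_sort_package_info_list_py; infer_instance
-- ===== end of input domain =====

-- B replaces partition-into-three-lists + three sorts + concatenation by two stable sorts
-- (name descending, then category rank ascending); same return value, similar cost (objective: simpler).

-- ===== PORT A =====
-- info['k']: Python dict lookup, modelled on the association list as first-match lookup
-- (List.lookup); the total default form is used only under Pre_, which requires the key to be
-- present exactly where Python would look it up. Truthiness of the (string) flags is 'value ≠ ""'.
def pvGetD (info : List (String × String)) (k : String) : String :=
  (info.lookup k).getD ""

def pvNameKey (info : List (String × String)) : String :=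
  PySem.Str.lower (pvGetD info "name")

def sort_package_info_list_py (info_list : List (List (String × String))) : List (List (String × String)) :=
  let p := info_list.foldl
    (fun (acc : List (List (String × String)) × List (List (String × String)) × List (List (String × String))) info =>
      if pvGetD info "is_system_package" ≠ "" then
        (acc.1 ++ [info], acc.2.1, acc.2.2)
      else if pvGetD info "is_default_user_package" ≠ "" then
        (acc.1, acc.2.1 ++ [info], acc.2.2)
      else
        (acc.1, acc.2.1, acc.2.2 ++ [info]))
    ([], [], [])
  PySem.List.sorted p.2.2 pvNameKey true ++ PySem.List.sorted p.2.1 pvNameKey true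
    ++ PySem.List.sorted p.1 pvNameKey true

-- ===== PORT B =====
def pvRank (info : List (String × String)) : Int :=
  if pvGetD info "is_system_package" ≠ "" then 2
  else if pvGetD info "is_default_user_package" ≠ "" then 1
  else 0

def sort_package_info_list_py_alt (info_list : List (List (String × String))) : List (List (String × String)) :=
  PySem.List.sorted (PySem.List.sorted info_list pvNameKey true) pvRank false

-- ===== PRECONDITION & SPEC =====
-- Pre_ excludes exactly the inputs where Python raises KeyError: every entry must carry
-- 'is_system_package' and 'name', and a non-system entry must carry 'is_default_user_package'.
def Pre_sort_package_info_list_py (info_list : List (List (String × String))) : Prop :=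
  ∀ info ∈ info_list,
    (info.lookup "is_system_package").isSome = true ∧
    (info.lookup "name").isSome = true ∧
    (pvGetD info "is_system_package" = "" → (info.lookup "is_default_user_package").isSome = true)
instance (info_list : List (List (String × String))) : Decidable (Pre_sort_package_info_list_py info_list) := by unfold Pre_sort_package_info_list_py; infer_instance

def pvWitness_sort_package_info_list_py : (List (List (String × String))) :=
  [[("is_system_package", "1"), ("name", "Alpha")],
   [("is_system_package", ""), ("is_default_user_package", ""), ("name", "beta")]]

def Spec_sort_package_info_list_py (info_list : List (List (String × String))) (out : List (List (String × String))) : Prop := out = sort_package_info_list_py_alt info_list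
instance (info_list : List (List (String × String))) (out : List (List (String × String))) : Decidable (Spec_sort_package_info_list_py info_list out) := by unfold Spec_sort_package_info_list_py; infer_instance

-- ===== CLAIM (what is proved, stated in full; the proofs are below) =====
def Claim_equal_sort_package_info_list_py : Prop := ∀ (info_list : List (List (String × String))), Dom_sort_package_info_list_py info_list → Pre_sort_package_info_list_py info_list → Spec_sort_package_info_list_py info_list (sort_package_info_list_py info_list)

-- ===== LEMMAS AND PROOFS =====

-- the boolean category predicates behind A's partition
def pvIsSys (info : List (String × String)) : Bool :=
  decide (pvGetD info "is_system_package" ≠ "")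
def pvIsDef (info : List (String × String)) : Bool :=
  decide (pvGetD info "is_default_user_package" ≠ "")

theorem pvInsertBy_nil {α : Type} (r : α → α → Bool) (x : α) :
    PySem.List.insertBy r x [] = [x] := rfl

theorem pvInsertBy_cons {α : Type} (r : α → α → Bool) (x y : α) (ys : List α) :
    PySem.List.insertBy r x (y :: ys) =
      if r x y then x :: y :: ys else y :: PySem.List.insertBy r x ys := rfl

-- stability invariant: the accumulator is ordered for '∀ z, r z a → r z b'
theorem pvPairwise_insertBy {α : Type} (r : α → α → Bool)
    (h1 : ∀ x y z, r z x = true → r x y = true → r z y = true)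
    (h2 : ∀ x y z, r z y = true → r x y = false → r z x = true)
    (x : α) (ys : List α)
    (hp : ys.Pairwise (fun a b => ∀ z, r z a = true → r z b = true)) :
    (PySem.List.insertBy r x ys).Pairwise (fun a b => ∀ z, r z a = true → r z b = true) := by
  induction ys with
  | nil => simp [pvInsertBy_nil]
  | cons y ys ih =>
    rcases List.pairwise_cons.mp hp with ⟨hy, hys⟩
    rw [pvInsertBy_cons]
    by_cases hr : r x y = true
    · rw [if_pos hr]
      refine List.pairwise_cons.mpr ⟨?_, hp⟩
      intro w hw z hzx
      rcases List.mem_cons.mp hw with hwy | hwys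
      · rw [hwy]; exact h1 x y z hzx hr
      · exact hy w hwys z (h1 x y z hzx hr)
    · rw [if_neg hr]
      rw [Bool.not_eq_true] at hr
      refine List.pairwise_cons.mpr ⟨?_, ih hys⟩
      intro w hw z hzy
      rcases (PySem.List.mem_insertBy r x w ys).mp hw with hwx | hwys
      · rw [hwx]; exact h2 x y z hzy hr
      · exact hy w hwys z hzy

-- filtering commutes with a stable insertion into an ordered accumulator
theorem pvFilter_insertBy {α : Type} (r : α → α → Bool) (p : α → Bool) (x : α) (ys : List α)
    (hp : ys.Pairwise (fun a b => ∀ z, r z a = true → r z b = true)) :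
    (PySem.List.insertBy r x ys).filter p =
      if p x then PySem.List.insertBy r x (ys.filter p) else ys.filter p := by
  induction ys with
  | nil => cases hpx : p x <;> simp [pvInsertBy_nil, hpx]
  | cons y ys ih =>
    rcases List.pairwise_cons.mp hp with ⟨hy, hys⟩
    rw [pvInsertBy_cons]
    by_cases hr : r x y = true
    · rw [if_pos hr]
      cases hpx : p x
      · simp [List.filter_cons, hpx]
      · cases hpy : p y
        · simp only [List.filter_cons, hpx, hpy, if_true, Bool.false_eq_true, if_false]
          cases hf : ys.filter p with
          | nil => simp [pvInsertBy_nil]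
          | cons z t =>
            have hz : z ∈ ys.filter p := by rw [hf]; exact List.mem_cons_self ..
            have hzys : z ∈ ys := (List.mem_filter.mp hz).1
            have hxz : r x z = true := hy z hzys x hr
            rw [pvInsertBy_cons, if_pos hxz]
        · simp only [List.filter_cons, hpx, hpy, if_true]
          rw [pvInsertBy_cons, if_pos hr]
    · rw [if_neg hr]
      cases hpx : p x
      · cases hpy : p y <;>
          simp [hpx, hpy, ih hys]
      · cases hpy : p y
        · simp [hpx, hpy, ih hys]
        · simp only [List.filter_cons, hpx, hpy, if_true, ih hys]
          rw [pvInsertBy_cons, if_neg hr]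

theorem pvFilter_foldl_insertBy {α : Type} (r : α → α → Bool) (p : α → Bool)
    (h1 : ∀ x y z, r z x = true → r x y = true → r z y = true)
    (h2 : ∀ x y z, r z y = true → r x y = false → r z x = true)
    (xs : List α) : ∀ acc, acc.Pairwise (fun a b => ∀ z, r z a = true → r z b = true) →
    (xs.foldl (fun a x => PySem.List.insertBy r x a) acc).filter p =
      (xs.filter p).foldl (fun a x => PySem.List.insertBy r x a) (acc.filter p) := by
  induction xs with
  | nil => intro acc _; rfl
  | cons x xs ih =>
    intro acc hacc
    have hstep := ih (PySem.List.insertBy r x acc) (pvPairwise_insertBy r h1 h2 x acc hacc)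
    simp only [List.foldl_cons, List.filter_cons]
    rw [hstep, pvFilter_insertBy r p x acc hacc]
    cases hpx : p x <;> simp

-- sorting (reverse=True) commutes with filtering (stability)
theorem pvFilter_sorted_rev {α : Type} (key : α → String) (p : α → Bool) (xs : List α) :
    (PySem.List.sorted xs key true).filter p = PySem.List.sorted (xs.filter p) key true := by
  rw [PySem.List.sorted_rev_eq_foldl_insertBy, PySem.List.sorted_rev_eq_foldl_insertBy]
  exact pvFilter_foldl_insertBy (fun a b => decide (key b < key a)) p
    (fun x y z hzx hxy => by
      simp only [decide_eq_true_eq] at *; exact lt_trans hxy hzx)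
    (fun x y z hzy hxy => by
      simp only [decide_eq_false_iff_not, decide_eq_true_eq] at *
      exact lt_of_le_of_lt (not_lt.mp hxy) hzy)
    xs [] List.Pairwise.nil

theorem pvRank_cases (info : List (String × String)) :
    pvRank info = 0 ∨ pvRank info = 1 ∨ pvRank info = 2 := by
  unfold pvRank; split_ifs <;> simp

theorem pvInsertBy_append_left {α : Type} (r : α → α → Bool) (x : α) (l2 : List α) :
    ∀ l1 : List α, (∀ y ∈ l1, r x y = false) →
      PySem.List.insertBy r x (l1 ++ l2) = l1 ++ PySem.List.insertBy r x l2 := by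
  intro l1
  induction l1 with
  | nil => intro _; rfl
  | cons y l1 ih =>
    intro h
    rw [List.cons_append, pvInsertBy_cons, h y List.mem_cons_self]
    simp only [Bool.false_eq_true, if_false, List.cons_append]
    rw [ih (fun z hz => h z (List.mem_cons_of_mem y hz))]

theorem pvInsertBy_head {α : Type} (r : α → α → Bool) (x : α) (l : List α)
    (h : ∀ y ∈ l, r x y = true) : PySem.List.insertBy r x l = x :: l := by
  cases l with
  | nil => rfl
  | cons z t => rw [pvInsertBy_cons, if_pos (h z List.mem_cons_self)]

-- a stable sort by the 3-valued rank is the concatenation of the three rank classes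
theorem pvSorted_rank_eq_filters (s : List (List (String × String))) :
    PySem.List.sorted s pvRank false =
      s.filter (fun i => decide (pvRank i = 0)) ++ s.filter (fun i => decide (pvRank i = 1))
        ++ s.filter (fun i => decide (pvRank i = 2)) := by
  induction s using List.reverseRecOn with
  | nil => rfl
  | append_singleton s x ih =>
    rw [PySem.List.sorted_eq_foldl_insertBy] at ih ⊢
    rw [List.foldl_append, List.foldl_cons, List.foldl_nil, ih]
    have mem_rank : ∀ (k : Int) (y : List (String × String)),
        y ∈ s.filter (fun i => decide (pvRank i = k)) → pvRank y = k := by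
      intro k y hy
      have := (List.mem_filter.mp hy).2
      simpa using this
    rcases pvRank_cases x with h0 | h1 | h2
    · rw [List.append_assoc,
        pvInsertBy_append_left _ x _ _ (fun y hy => by
          have := mem_rank 0 y hy; simp [this, h0]),
        pvInsertBy_head _ x _ (fun y hy => by
          rcases List.mem_append.mp hy with hy1 | hy2
          · have := mem_rank 1 y hy1; simp [this, h0]
          · have := mem_rank 2 y hy2; simp [this, h0])]
      simp [List.filter_append, h0]
    · rw [pvInsertBy_append_left _ x _ _ (fun y hy => by
          rcases List.mem_append.mp hy with hy0 | hy1
          · have := mem_rank 0 y hy0; simp [this, h1]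
          · have := mem_rank 1 y hy1; simp [this, h1]),
        pvInsertBy_head _ x _ (fun y hy => by
          have := mem_rank 2 y hy; simp [this, h1])]
      simp [List.filter_append, h1]
    · rw [PySem.List.insertBy_of_forall_not_before _ x _ (fun y hy => by
        rcases List.mem_append.mp hy with hy01 | hy2
        · rcases List.mem_append.mp hy01 with hy0 | hy1
          · have := mem_rank 0 y hy0; simp [this, h2]
          · have := mem_rank 1 y hy1; simp [this, h2]
        · have := mem_rank 2 y hy2; simp [this, h2])]
      simp [List.filter_append, h2]

-- A's partition loop computes the three category filters
theorem pvPartition (xs : List (List (String × String))) :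
    ∀ acc : List (List (String × String)) × List (List (String × String)) × List (List (String × String)),
    xs.foldl
      (fun acc info =>
        if pvGetD info "is_system_package" ≠ "" then
          (acc.1 ++ [info], acc.2.1, acc.2.2)
        else if pvGetD info "is_default_user_package" ≠ "" then
          (acc.1, acc.2.1 ++ [info], acc.2.2)
        else
          (acc.1, acc.2.1, acc.2.2 ++ [info])) acc
    = (acc.1 ++ xs.filter pvIsSys,
       acc.2.1 ++ xs.filter (fun i => !pvIsSys i && pvIsDef i),
       acc.2.2 ++ xs.filter (fun i => !pvIsSys i && !pvIsDef i)) := by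
  induction xs with
  | nil => intro acc; simp
  | cons x xs ih =>
    intro acc
    simp only [List.foldl_cons, List.filter_cons]
    by_cases hs : pvGetD x "is_system_package" ≠ ""
    · rw [if_pos hs, ih]
      simp [pvIsSys, pvIsDef, hs]
    · rw [if_neg hs]
      by_cases hd : pvGetD x "is_default_user_package" ≠ ""
      · rw [if_pos hd, ih]
        simp [pvIsSys, pvIsDef, hs, hd]
      · rw [if_neg hd, ih]
        simp [pvIsSys, pvIsDef, hs, hd]

-- the rank classes are exactly A's category predicates
theorem pvRank0_eq (i : List (String × String)) :
    decide (pvRank i = 0) = (!pvIsSys i && !pvIsDef i) := by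
  simp only [pvRank, pvIsSys, pvIsDef]; split_ifs <;> simp_all
theorem pvRank1_eq (i : List (String × String)) :
    decide (pvRank i = 1) = (!pvIsSys i && pvIsDef i) := by
  simp only [pvRank, pvIsSys, pvIsDef]; split_ifs <;> simp_all
theorem pvRank2_eq (i : List (String × String)) :
    decide (pvRank i = 2) = pvIsSys i := by
  simp only [pvRank, pvIsSys]; split_ifs <;> simp_all

-- ===== VERDICT (by name: the statement is the Claim_ definition above) =====
theorem sort_package_info_list_py_spec : Claim_equal_sort_package_info_list_py := by
  intro xs _ _
  show sort_package_info_list_py xs = sort_package_info_list_py_alt xs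
  simp only [sort_package_info_list_py, sort_package_info_list_py_alt]
  rw [pvPartition xs ([], [], [])]
  simp only [List.nil_append]
  rw [pvSorted_rank_eq_filters]
  rw [List.filter_congr (fun i _ => pvRank0_eq i),
      List.filter_congr (fun i _ => pvRank1_eq i),
      List.filter_congr (fun i _ => pvRank2_eq i)]
  rw [pvFilter_sorted_rev pvNameKey _ xs, pvFilter_sorted_rev pvNameKey _ xs,
      pvFilter_sorted_rev pvNameKey _ xs]
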